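-- pv_equiv track=rewrite | github.com/a0mfares/CIE-425-projects | app.py | lempel_ziv_decode
-- ===== SOURCE A (Python) =====
-- def lempel_ziv_decode(encoded, alphabet):
--     """Decode sequence using Lempel-Ziv (LZ78) algorithm
--
--     Args:
--         encoded: List of (code, symbol) tuples
--         alphabet: List of symbols in the alphabet (for validation)
--
--     Returns:
--         List of decoded symbols
--     """
--     if not encoded:
--         return []
--
--     # Initialize dictionary with empty string
--     dictionary = {0: ''}
--     next_code = 1
--
--     decoded = []
--
--     for code, symbol in encoded:
--         # Get the string corresponding to the code
--         if code in dictionary: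
--             decoded_string = dictionary[code]
--         else:
--             # This shouldn't happen in valid LZ78
--             decoded_string = ''
--
--         # Output the decoded string
--         decoded.extend(list(decoded_string))
--
--         # If there's a following symbol, output it and add to dictionary
--         if symbol is not None:
--             decoded.append(symbol)
--
--             # Add new string to dictionary
--             new_string = decoded_string + symbol
--             dictionary[next_code] = new_string
--             next_code += 1
--
--     return decoded
-- ===== SOURCE B (Python) =====
-- def lempel_ziv_decode(encoded, alphabet):
--     """Decode LZ78 tuples using back-pointer dictionary entries instead of full phrase strings."""
--     parent = {0: None}
--     next_code = 1
--     decoded = []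
--     for code, symbol in encoded:
--         chain = []
--         if code in parent:
--             c = code
--             while c != 0:
--                 p, s = parent[c]
--                 chain.append(s)
--                 c = p
--         for s in reversed(chain):
--             decoded.extend(s)
--         if symbol is not None:
--             decoded.append(symbol)
--             parent[next_code] = (code if code in parent else 0, symbol)
--             next_code += 1
--     return decoded
-- ===== Notes on version B (the rewrite author's own statement) =====
-- stated objective: alternative
-- what changed: The decoder dictionary stores constant-size back-pointer entries (prev_code, symbol) instead of full concatenated phrase strings; each phrase is reconstructed by walking the parent chain and reversing, so no growing strings are built or copied at insertion time.
import Mathlib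
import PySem

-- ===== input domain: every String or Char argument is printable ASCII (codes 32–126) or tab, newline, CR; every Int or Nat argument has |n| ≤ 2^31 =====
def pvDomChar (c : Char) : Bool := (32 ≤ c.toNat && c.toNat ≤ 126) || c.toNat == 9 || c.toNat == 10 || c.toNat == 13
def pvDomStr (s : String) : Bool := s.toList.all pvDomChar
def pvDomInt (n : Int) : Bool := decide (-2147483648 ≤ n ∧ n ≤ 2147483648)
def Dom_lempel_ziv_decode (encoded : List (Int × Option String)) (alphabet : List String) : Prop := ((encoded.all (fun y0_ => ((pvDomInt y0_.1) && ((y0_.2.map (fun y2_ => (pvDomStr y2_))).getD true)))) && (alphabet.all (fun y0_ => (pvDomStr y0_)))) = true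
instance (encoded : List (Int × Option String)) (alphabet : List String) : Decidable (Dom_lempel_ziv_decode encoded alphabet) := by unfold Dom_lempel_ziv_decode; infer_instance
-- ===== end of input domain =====

-- B replaces A's phrase-string dictionary by back-pointer entries reconstructed by chain walking (alternative data structure, same output).
-- Python str values held INSIDE the dictionaries are modelled as List Char (exact: only their character sequences matter).

-- ===== PORT A =====
-- one loop step of A: (dictionary, next_code, decoded) updated by one (code, symbol) pair
def lzdStepA (st : PySem.Dict Int (List Char) × Int × List String) (p : Int × Option String) :
    PySem.Dict Int (List Char) × Int × List String :=
  let dict := st.1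
  let nc := st.2.1
  let ds : List Char := if dict.contains p.1 then dict.getD p.1 [] else []
  let dec := st.2.2 ++ ds.map (fun c => String.ofList [c])   -- decoded.extend(list(decoded_string))
  match p.2 with
  | some s => (dict.insert nc (ds ++ s.toList), nc + 1, dec ++ [s])
  | none => (dict, nc, dec)

def lempel_ziv_decode (encoded : List (Int × Option String)) (_alphabet : List String) : List String :=
  if encoded = [] then []
  else (encoded.foldl lzdStepA ((PySem.Dict.empty : PySem.Dict Int (List Char)).insert 0 [], 1, [])).2.2

-- ===== PORT B =====
-- the 'while c != 0' chain walk of Source B; fuel = next_code bounds the strictly decreasing chain (exact totalization)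
def lzChain (parent : PySem.Dict Int (Option (Int × List Char))) : Nat → Int → List (List Char)
  | 0, _ => []
  | fuel + 1, c =>
    if c = 0 then []
    else match parent.get? c with
      | some (some (p, s)) => s :: lzChain parent fuel p
      | _ => []

def lzdStepB (st : PySem.Dict Int (Option (Int × List Char)) × Int × List String) (p : Int × Option String) :
    PySem.Dict Int (Option (Int × List Char)) × Int × List String :=
  let parent := st.1
  let nc := st.2.1
  let chain := if parent.contains p.1 then lzChain parent nc.toNat p.1 else []
  let dec := st.2.2 ++ chain.reverse.flatMap (fun s => s.map (fun c => String.ofList [c]))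
  match p.2 with
  | some s => (parent.insert nc (some (if parent.contains p.1 then p.1 else 0, s.toList)), nc + 1, dec ++ [s])
  | none => (parent, nc, dec)

def lempel_ziv_decode_alt (encoded : List (Int × Option String)) (_alphabet : List String) : List String :=
  (encoded.foldl lzdStepB ((PySem.Dict.empty : PySem.Dict Int (Option (Int × List Char))).insert 0 none, 1, [])).2.2

-- ===== PRECONDITION & SPEC =====
def Spec_lempel_ziv_decode (encoded : List (Int × Option String)) (alphabet : List String) (out : List String) : Prop := out = lempel_ziv_decode_alt encoded alphabet
instance (encoded : List (Int × Option String)) (alphabet : List String) (out : List String) : Decidable (Spec_lempel_ziv_decode encoded alphabet out) := by unfold Spec_lempel_ziv_decode; infer_instance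

-- ===== CLAIM (what is proved, stated in full; the proofs are below) =====
def Claim_equal_lempel_ziv_decode : Prop := ∀ (encoded : List (Int × Option String)) (alphabet : List String), Dom_lempel_ziv_decode encoded alphabet → Spec_lempel_ziv_decode encoded alphabet (lempel_ziv_decode encoded alphabet)

-- ===== LEMMAS AND PROOFS =====

-- relation between A's phrase dictionary and B's back-pointer dictionary after the same prefix
def LZInv (dict : PySem.Dict Int (List Char)) (parent : PySem.Dict Int (Option (Int × List Char))) (nc : Int) : Prop :=
  1 ≤ nc ∧
  (∀ k, dict.contains k = true ↔ 0 ≤ k ∧ k < nc) ∧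
  (∀ k, parent.contains k = true ↔ 0 ≤ k ∧ k < nc) ∧
  dict.getD 0 [] = [] ∧
  (∀ k, 0 < k → k < nc → ∃ p s, parent.get? k = some (some (p, s)) ∧ 0 ≤ p ∧ p < k ∧
      dict.getD k [] = dict.getD p [] ++ s)

theorem lzChain_spec (dict : PySem.Dict Int (List Char)) (parent : PySem.Dict Int (Option (Int × List Char)))
    (nc : Int) (hinv : LZInv dict parent nc) :
    ∀ (fuel : Nat) (k : Int), 0 ≤ k → k < nc → k.toNat < fuel →
      ((lzChain parent fuel k).reverse).flatten = dict.getD k [] := by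
  intro fuel
  induction fuel with
  | zero => intro k _ _ h; omega
  | succ fuel ih =>
    intro k hk0 hknc hfuel
    by_cases hk : k = 0
    · subst hk
      simp [lzChain, hinv.2.2.2.1]
    · obtain ⟨p, s, hget, hp0, hpk, heq⟩ := hinv.2.2.2.2 k (by omega) hknc
      rw [lzChain, if_neg hk, hget]
      simp only [List.reverse_cons, List.flatten_append, List.flatten_cons, List.flatten_nil,
        List.append_nil]
      rw [ih p hp0 (by omega) (by omega), heq]

-- the two loop bodies agree on outputs and re-establish the invariant
theorem lzd_loop (l : List (Int × Option String)) :
    ∀ (dict : PySem.Dict Int (List Char)) (parent : PySem.Dict Int (Option (Int × List Char)))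
      (nc : Int) (dec : List String), LZInv dict parent nc →
      (l.foldl lzdStepA (dict, nc, dec)).2.2 = (l.foldl lzdStepB (parent, nc, dec)).2.2 := by
  induction l with
  | nil => intro dict parent nc dec _; rfl
  | cons x t ih =>
    intro dict parent nc dec hinv
    obtain ⟨hnc, hcd, hcp, hd0, hchain⟩ := hinv
    -- the two membership tests agree
    have hc : dict.contains x.1 = parent.contains x.1 := by
      by_cases hb : 0 ≤ x.1 ∧ x.1 < nc
      · rw [(hcd x.1).mpr hb, (hcp x.1).mpr hb]
      · have h1 : dict.contains x.1 ≠ true := fun h => hb ((hcd x.1).mp h)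
        have h2 : parent.contains x.1 ≠ true := fun h => hb ((hcp x.1).mp h)
        simp only [Bool.not_eq_true] at h1 h2
        rw [h1, h2]
    -- the emitted phrase agrees
    have hds : (if parent.contains x.1 then lzChain parent nc.toNat x.1 else []).reverse.flatten
        = (if dict.contains x.1 then dict.getD x.1 [] else []) := by
      rw [hc]
      by_cases hmem : parent.contains x.1 = true
      · have hb : 0 ≤ x.1 ∧ x.1 < nc := (hcp x.1).mp hmem
        rw [if_pos hmem, if_pos hmem,
          lzChain_spec dict parent nc ⟨hnc, hcd, hcp, hd0, hchain⟩ nc.toNat x.1 hb.1 hb.2 (by omega)]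
      · rw [if_neg hmem, if_neg hmem]; rfl
    have hdec : (if dict.contains x.1 then dict.getD x.1 [] else []).map (fun c => String.ofList [c])
        = (if parent.contains x.1 then lzChain parent nc.toNat x.1 else []).reverse.flatMap
            (fun s => s.map (fun c => String.ofList [c])) := by
      rw [List.flatMap_def, ← List.map_flatten, hds]
    match hx : x.2 with
    | none =>
      simp only [List.foldl_cons, lzdStepA, lzdStepB, hx]
      rw [ih dict parent nc _ ⟨hnc, hcd, hcp, hd0, hchain⟩, hdec]
    | some s =>
      simp only [List.foldl_cons, lzdStepA, lzdStepB, hx]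
      rw [hdec]
      -- apply the induction hypothesis to the updated states
      apply ih
      refine ⟨by omega, ?_, ?_, ?_, ?_⟩
      · intro k
        rw [PySem.Dict.contains_insert]
        constructor
        · intro h
          rcases Bool.or_eq_true_iff.mp h with h | h
          · have : k = nc := by exact_mod_cast of_decide_eq_true h
            omega
          · have := (hcd k).mp h; omega
        · intro h
          by_cases hk : k = nc
          · subst hk; simp
          · have : dict.contains k = true := (hcd k).mpr ⟨h.1, by omega⟩
            simp [this]
      · intro k
        rw [PySem.Dict.contains_insert]
        constructor
        · intro h
          rcases Bool.or_eq_true_iff.mp h with h | h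
          · have : k = nc := by exact_mod_cast of_decide_eq_true h
            omega
          · have := (hcp k).mp h; omega
        · intro h
          by_cases hk : k = nc
          · subst hk; simp
          · have : parent.contains k = true := (hcp k).mpr ⟨h.1, by omega⟩
            simp [this]
      · rw [PySem.Dict.getD_insert_of_ne _ _ _ (by omega : (0:Int) ≠ nc), hd0]
      · intro k hk0 hknc1
        by_cases hk : k = nc
        · rw [hk]
          refine ⟨(if parent.contains x.1 then x.1 else 0), s.toList, ?_, ?_, ?_, ?_⟩
          · rw [PySem.Dict.get?_insert_self]
          · by_cases hmem : parent.contains x.1 = true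
            · have := (hcp x.1).mp hmem; rw [if_pos hmem]; omega
            · rw [if_neg hmem]
          · by_cases hmem : parent.contains x.1 = true
            · have := (hcp x.1).mp hmem; rw [if_pos hmem]; omega
            · rw [if_neg hmem]; omega
          · rw [PySem.Dict.getD_insert_self]
            have hpc : (if parent.contains x.1 then x.1 else 0) ≠ nc := by
              by_cases hmem : parent.contains x.1 = true
              · have := (hcp x.1).mp hmem; rw [if_pos hmem]; omega
              · rw [if_neg hmem]; omega
            rw [PySem.Dict.getD_insert_of_ne _ _ _ hpc, ← hc]
            by_cases hmem : dict.contains x.1 = true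
            · rw [if_pos hmem, if_pos hmem]
            · rw [if_neg hmem, if_neg hmem, hd0]
        · obtain ⟨p, s', hget, hp0, hpk, heq⟩ := hchain k hk0 (by omega)
          refine ⟨p, s', ?_, hp0, hpk, ?_⟩
          · rw [PySem.Dict.get?_insert_of_ne _ _ hk, hget]
          · rw [PySem.Dict.getD_insert_of_ne _ _ _ hk,
              PySem.Dict.getD_insert_of_ne _ _ _ (by omega : p ≠ nc), heq]

theorem lzInv_init : LZInv ((PySem.Dict.empty : PySem.Dict Int (List Char)).insert 0 [])
    ((PySem.Dict.empty : PySem.Dict Int (Option (Int × List Char))).insert 0 none) 1 := by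
  refine ⟨le_refl 1, ?_, ?_, ?_, ?_⟩
  · intro k
    rw [PySem.Dict.contains_insert]
    simp [PySem.Dict.contains_empty]
    constructor
    · intro h; omega
    · intro h; omega
  · intro k
    rw [PySem.Dict.contains_insert]
    simp [PySem.Dict.contains_empty]
    constructor
    · intro h; omega
    · intro h; omega
  · rw [PySem.Dict.getD_insert_self]
  · intro k hk0 hk1; omega

-- ===== VERDICT (by name: the statement is the Claim_ definition above) =====
theorem lempel_ziv_decode_spec : Claim_equal_lempel_ziv_decode := by
  intro encoded alphabet _
  unfold Spec_lempel_ziv_decode lempel_ziv_decode lempel_ziv_decode_alt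
  by_cases he : encoded = []
  · subst he; rfl
  · rw [if_neg he]
    exact lzd_loop encoded _ _ 1 [] lzInv_init
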